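-- pv_equiv track=rewrite | github.com/hms-dbmi/Submit4DN | wranglertools/get_field_info.py | sort_item_list
-- ===== SOURCE A (Python) =====
-- def sort_item_list(item_list, item_id, field):
--     """Sort all items in list alphabetically based on values in the given field and bring item_id to beginning."""
--     # sort all items based on the key
--     sorted_list = sorted(item_list, key=lambda k: ("" if k.get(field) is None else k.get(field)))
--     # move the item_id ones to the front
--     move_list = [i for i in sorted_list if i.get(field) == item_id]
--     move_list.reverse()
--     for move_item in move_list:
--         try:
--             sorted_list.remove(move_item)
--             sorted_list.insert(0, move_item)
--         except:  # pragma: no cover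
--             pass
--     return sorted_list
-- ===== SOURCE B (Python) =====
-- def sort_item_list(item_list, item_id, field):
--     """Sort all items alphabetically on the given field and bring every item whose
--     field equals item_id to the beginning, keeping the sorted order in each part."""
--     s = sorted(item_list, key=lambda k: ("" if k.get(field) is None else k.get(field)))
--     return ([i for i in s if i.get(field) == item_id]
--             + [i for i in s if i.get(field) != item_id])
-- ===== Notes on version B (the rewrite author's own statement) =====
-- stated objective: simpler
-- what changed: Replaces A's move phase (filter the matches, reverse, then repeatedly list.remove + insert(0)) with a plain stable partition of the sorted list: all matching items first, the rest after, no mutation loop.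
-- intended difference: On lists where a later duplicate copy of a dict matching item_id would sort after a non-matching item or after another distinct matching dict's first occurrence, A's remove/insert moves only the first copy of each distinct dict to the front and strands the later equal copies at their sorted position mid-list (e.g. A returns [{'f':'y'},{'f':'a'},{'f':'y'}]), while B brings all matching copies to the front ([{'f':'y'},{'f':'y'},{'f':'a'}]), which is what 'bring item_id to beginning' intends. — e.g. on sort_item_list([[("f", "a")], [("f", "y")], [("f", "y")]], "y", "f"): A returns [[("f", "y")], [("f", "a")], [("f", "y")]], B returns [[("f", "y")], [("f", "y")], [("f", "a")]]
import Mathlib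
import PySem

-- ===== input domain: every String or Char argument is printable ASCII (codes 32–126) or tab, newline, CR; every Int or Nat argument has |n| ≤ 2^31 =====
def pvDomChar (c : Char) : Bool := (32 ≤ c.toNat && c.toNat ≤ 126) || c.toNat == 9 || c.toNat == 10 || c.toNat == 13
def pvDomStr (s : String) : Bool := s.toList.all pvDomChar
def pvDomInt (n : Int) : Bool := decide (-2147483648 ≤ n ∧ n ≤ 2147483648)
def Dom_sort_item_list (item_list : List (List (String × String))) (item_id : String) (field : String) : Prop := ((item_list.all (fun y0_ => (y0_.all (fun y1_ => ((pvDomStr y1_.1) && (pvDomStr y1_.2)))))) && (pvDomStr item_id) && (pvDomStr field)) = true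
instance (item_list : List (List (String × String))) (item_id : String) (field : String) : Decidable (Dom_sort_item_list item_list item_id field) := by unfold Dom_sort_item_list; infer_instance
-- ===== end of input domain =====

-- B replaces A's move phase (filter + reverse + repeated list.remove/insert(0)) by a plain
-- stable partition of the sorted list (all matches first); on lists with duplicate matching
-- dicts plus another item A strands later copies mid-list — stated as an intended difference.


-- ===== PORT A =====
-- k.get(field) on a dict ported as first-match lookup in the association list
def pyGet (k : List (String × String)) (field : String) : Option String :=
  (k.find? (fun p => p.1 == field)).map (·.2)

-- the sort key:  "" if k.get(field) is None else k.get(field)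
-- (compared as List Char — Python's code-point lexicographic string order, per PySem convention)
def keyOf (field : String) (k : List (String × String)) : List Char :=
  ((pyGet k field).getD "").toList

-- i.get(field) == item_id  (None == str is False)
def isMatch (item_id field : String) (k : List (String × String)) : Bool :=
  pyGet k field == some item_id

-- Python's dict equality (order-insensitive), used by list.remove: exact for the
-- association lists that represent dicts
def dictEq (x y : List (String × String)) : Bool :=
  x.all (fun p => pyGet y p.1 == some p.2) && y.all (fun p => pyGet x p.1 == some p.2)

-- sorted_list.remove(move_item): drop the FIRST element dict-equal to m (none = ValueError)
def removeFirstEq : List (List (String × String)) → List (String × String) →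
    Option (List (List (String × String)))
  | [], _ => none
  | x :: xs, m => if dictEq x m then some xs else (removeFirstEq xs m).map (x :: ·)

def sort_item_list (item_list : List (List (String × String))) (item_id : String) (field : String) : List (List (String × String)) :=
  let sorted_list := PySem.List.sorted item_list (keyOf field) false
  let move_list := (sorted_list.filter (isMatch item_id field)).reverse
  move_list.foldl (fun cur m =>
      match removeFirstEq cur m with
      | some cur' => m :: cur'   -- remove succeeded, then insert(0, move_item)
      | none => cur)             -- except: pass
    sorted_list

-- ===== PORT B =====
def sort_item_list_alt (item_list : List (List (String × String))) (item_id : String) (field : String) : List (List (String × String)) :=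
  let s := PySem.List.sorted item_list (keyOf field) false
  -- [i for i in s if i.get(field) == item_id] + [i for i in s if i.get(field) != item_id]
  s.filter (isMatch item_id field) ++ s.filter (fun i => !isMatch item_id field i)

-- ===== PRECONDITION & SPEC =====
-- Pre_ restricts items to association lists with distinct keys — exactly the images of
-- Python dicts, A's actual argument type; duplicate-key lists represent no Python input.
def Pre_sort_item_list (item_list : List (List (String × String))) (item_id : String) (field : String) : Prop :=
  ∀ k ∈ item_list, (k.map Prod.fst).Nodup
instance (item_list : List (List (String × String))) (item_id : String) (field : String) : Decidable (Pre_sort_item_list item_list item_id field) := by unfold Pre_sort_item_list; infer_instance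

def pvWitness_sort_item_list : (List (List (String × String))) × String × String :=
  ([[("f", "b")], [("f", "a")]], "b", "f")

-- On lists where a later duplicate copy of a matching dict would end up after a non-matching
-- item or after another distinct matching dict's first occurrence, A's remove/insert moves only
-- one copy per distinct dict to the front and strands the later copies mid-list, while B brings
-- all matching copies to the front — which is what "bring item_id to beginning" intends.
-- (E below: the items whose sort key equals item_id, in input order; j a later duplicate copy.)
def D_sort_item_list (item_list : List (List (String × String))) (item_id : String) (field : String) : Prop :=
  let E := item_list.filter fun z => (pyGet z field).getD "" == item_id
  let m i := isMatch item_id field E[i]!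
  let d i j := dictEq E[i]! E[j]!
  ∃ j, j < E.length ∧ m j ∧ (∃ i, i < j ∧ d i j) ∧
    ((∃ z ∈ item_list, keyOf field z < item_id.toList) ∨
      ∃ k, k < E.length ∧ ((k < j ∧ ¬m k) ∨ (j < k ∧ m k ∧ ∀ i, i < j → ¬d i k)))
instance (item_list : List (List (String × String))) (item_id : String) (field : String) : Decidable (D_sort_item_list item_list item_id field) := by unfold D_sort_item_list; infer_instance

def Spec_sort_item_list (item_list : List (List (String × String))) (item_id : String) (field : String) (out : List (List (String × String))) : Prop := ¬ D_sort_item_list item_list item_id field → out = sort_item_list_alt item_list item_id field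
instance (item_list : List (List (String × String))) (item_id : String) (field : String) (out : List (List (String × String))) : Decidable (Spec_sort_item_list item_list item_id field out) := by unfold Spec_sort_item_list; infer_instance

def pvDiffWitness_sort_item_list : (List (List (String × String))) × String × String :=
  ([[("f", "a")], [("f", "y")], [("f", "y")]], "y", "f")

def pvDiffWitnessOut_sort_item_list : (List (List (String × String))) × (List (List (String × String))) :=
  ([[("f", "y")], [("f", "a")], [("f", "y")]], [[("f", "y")], [("f", "y")], [("f", "a")]])

-- ===== CLAIM (what is proved, stated in full; the proofs are below) =====
def Claim_unchanged_sort_item_list : Prop := ∀ (item_list : List (List (String × String))) (item_id : String) (field : String), Dom_sort_item_list item_list item_id field → Pre_sort_item_list item_list item_id field → Spec_sort_item_list item_list item_id field (sort_item_list item_list item_id field)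
def Claim_changed_sort_item_list : Prop := Dom_sort_item_list (pvDiffWitness_sort_item_list.1) (pvDiffWitness_sort_item_list.2.1) (pvDiffWitness_sort_item_list.2.2) ∧ Pre_sort_item_list (pvDiffWitness_sort_item_list.1) (pvDiffWitness_sort_item_list.2.1) (pvDiffWitness_sort_item_list.2.2) ∧ D_sort_item_list (pvDiffWitness_sort_item_list.1) (pvDiffWitness_sort_item_list.2.1) (pvDiffWitness_sort_item_list.2.2) ∧ sort_item_list (pvDiffWitness_sort_item_list.1) (pvDiffWitness_sort_item_list.2.1) (pvDiffWitness_sort_item_list.2.2) = pvDiffWitnessOut_sort_item_list.1 ∧ sort_item_list_alt (pvDiffWitness_sort_item_list.1) (pvDiffWitness_sort_item_list.2.1) (pvDiffWitness_sort_item_list.2.2) = pvDiffWitnessOut_sort_item_list.2 ∧ pvDiffWitnessOut_sort_item_list.1 ≠ pvDiffWitnessOut_sort_item_list.2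
def Claim_exact_sort_item_list : Prop := ∀ (item_list : List (List (String × String))) (item_id : String) (field : String), Dom_sort_item_list item_list item_id field → Pre_sort_item_list item_list item_id field → D_sort_item_list item_list item_id field → sort_item_list item_list item_id field ≠ sort_item_list_alt item_list item_id field

-- ===== LEMMAS AND PROOFS =====

-- dict-equal lists agree on every lookup
lemma pyGet_eq_of_dictEq {x y : List (String × String)} (h : dictEq x y = true) (f : String) :
    pyGet x f = pyGet y f := by
  unfold dictEq at h
  rw [Bool.and_eq_true, List.all_eq_true, List.all_eq_true] at h
  obtain ⟨h1, h2⟩ := h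
  unfold pyGet
  cases hfx : x.find? (fun p => p.1 == f) with
  | some p =>
      have hmem := List.mem_of_find?_eq_some hfx
      have hkey : p.1 = f := by have := List.find?_some hfx; simpa using this
      have hy : pyGet y p.1 = some p.2 := by have := h1 p hmem; simpa using this
      rw [hkey] at hy
      unfold pyGet at hy
      rw [hy]
      rfl
  | none =>
      have hx : ∀ q ∈ x, ¬(q.1 == f) = true := List.find?_eq_none.mp hfx
      cases hfy : y.find? (fun p => p.1 == f) with
      | some q =>
          exfalso
          have hmem := List.mem_of_find?_eq_some hfy
          have hkey : q.1 = f := by have := List.find?_some hfy; simpa using this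
          have hxq : pyGet x q.1 = some q.2 := by have := h2 q hmem; simpa using this
          rw [hkey] at hxq
          unfold pyGet at hxq
          rw [hfx] at hxq
          simp at hxq
      | none => rfl

lemma dictEq_symm (x y : List (String × String)) : dictEq x y = dictEq y x := by
  unfold dictEq; rw [Bool.and_comm]

lemma pyGet_of_mem_nodup {x : List (String × String)} {p : String × String}
    (h : (x.map Prod.fst).Nodup) (hp : p ∈ x) : pyGet x p.1 = some p.2 := by
  induction x with
  | nil => cases hp
  | cons q xs ih =>
      rw [List.map_cons, List.nodup_cons] at h
      obtain ⟨hq, hnd⟩ := h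
      rcases List.mem_cons.mp hp with rfl | hp'
      · unfold pyGet
        simp [List.find?]
      · unfold pyGet
        rw [List.find?_cons]
        have hne : (q.1 == p.1) = false := by
          rw [beq_eq_false_iff_ne]
          intro hEq
          exact hq (hEq ▸ List.mem_map_of_mem hp')
        rw [hne]
        exact ih hnd hp'

lemma dictEq_refl {x : List (String × String)} (h : (x.map Prod.fst).Nodup) :
    dictEq x x = true := by
  unfold dictEq
  rw [Bool.and_eq_true, List.all_eq_true]
  refine ⟨?_, ?_⟩ <;> · intro p hp; simp [pyGet_of_mem_nodup h hp]

lemma isMatch_eq_of_dictEq {x y : List (String × String)} (h : dictEq x y = true)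
    (item_id field : String) : isMatch item_id field x = isMatch item_id field y := by
  unfold isMatch; rw [pyGet_eq_of_dictEq h]

-- two lists dict-equal to a common list are dict-equal to each other
lemma dictEq_trans' {x m a : List (String × String)} (h1 : dictEq x m = true)
    (h2 : dictEq x a = true) : dictEq m a = true := by
  have e1 := pyGet_eq_of_dictEq h1
  have e2 := pyGet_eq_of_dictEq h2
  unfold dictEq at h1 h2 ⊢
  rw [Bool.and_eq_true, List.all_eq_true, List.all_eq_true] at h1 h2 ⊢
  obtain ⟨-, h1b⟩ := h1
  obtain ⟨-, h2b⟩ := h2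
  constructor
  · intro p hp
    have := h1b p hp
    rw [beq_iff_eq] at this ⊢
    rw [← e2 p.1, this]
  · intro q hq
    have := h2b q hq
    rw [beq_iff_eq] at this ⊢
    rw [← e1 q.1, this]

lemma dictEq_trans {x y z : List (String × String)} (h1 : dictEq x y = true)
    (h2 : dictEq y z = true) : dictEq x z = true :=
  dictEq_trans' (show dictEq y x = true by rw [← dictEq_symm]; exact h1) h2

-- dict-equal targets induce the same equality test
lemma eqPred_ext {m n : List (String × String)} (h : dictEq m n = true) :
    (fun z => dictEq z m) = (fun z => dictEq z n) := by
  funext z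
  by_cases hz : dictEq z m = true
  · rw [hz, dictEq_trans hz h]
  · have hz' : dictEq z m = false := by simpa using hz
    have hzn : dictEq z n = false := by
      by_contra hc
      rw [Bool.not_eq_false] at hc
      rw [dictEq_trans hc (by rw [← dictEq_symm]; exact h)] at hz'
      cases hz'
    rw [hz', hzn]

-- list.remove when the target's class occurs exactly once: remove = filter
lemma removeFirstEq_of_countP_one {l : List (List (String × String))} {m : List (String × String)}
    (h : l.countP (fun x => dictEq x m) = 1) :
    removeFirstEq l m = some (l.filter (fun x => !(dictEq x m))) := by
  induction l with
  | nil => simp [List.countP_nil] at h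
  | cons a t ih =>
      rw [List.countP_cons] at h
      unfold removeFirstEq
      by_cases ha : dictEq a m = true
      · rw [if_pos ha]
        have ht : t.countP (fun x => dictEq x m) = 0 := by simpa [ha] using h
        have htf : t.filter (fun x => !(dictEq x m)) = t := by
          rw [List.filter_eq_self]
          intro z hz
          have := List.countP_eq_zero.mp ht z hz
          simpa using this
        rw [List.filter_cons]
        simp [ha, htf]
      · rw [if_neg ha]
        have ha' : dictEq a m = false := by simpa using ha
        rw [List.filter_cons]
        have h' : t.countP (fun x => dictEq x m) = 1 := by simpa [ha'] using h
        rw [ih h']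
        simp [ha']

lemma countP_eq_one_of_pairwise {ms : List (List (String × String))}
    {r m : List (String × String)}
    (hp : ms.Pairwise (fun a b => dictEq a b = false)) (hr : r ∈ ms)
    (hrm : dictEq r m = true) : ms.countP (fun x => dictEq x m) = 1 := by
  induction ms with
  | nil => cases hr
  | cons a t ih =>
      rw [List.pairwise_cons] at hp
      obtain ⟨hf, hp'⟩ := hp
      rw [List.countP_cons]
      rcases List.mem_cons.mp hr with rfl | hr'
      · have ht : t.countP (fun x => dictEq x m) = 0 := by
          rw [List.countP_eq_zero]
          intro z hz
          have hrz : dictEq r z = false := hf z hz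
          intro hzm
          rw [dictEq_trans hrm (by rw [← dictEq_symm]; exact hzm)] at hrz
          cases hrz
        simp [ht, hrm]
      · have ha : dictEq a m = false := by
          have haR : dictEq a r = false := hf r hr'
          by_contra hc
          rw [Bool.not_eq_false] at hc
          rw [dictEq_trans hc (by rw [← dictEq_symm]; exact hrm)] at haR
          cases haR
        simp [ha, ih hp' hr']

-- ----- total remove-first and its algebra -----

-- remF l m = l with the first dict-equal occurrence of m removed (l unchanged if none)
def remF (l : List (List (String × String))) (m : List (String × String)) :
    List (List (String × String)) :=
  (removeFirstEq l m).getD l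

lemma remF_cons_hit {x m : List (String × String)} {t : List (List (String × String))}
    (h : dictEq x m = true) : remF (x :: t) m = t := by
  unfold remF removeFirstEq
  rw [if_pos h]
  rfl

lemma remF_cons_miss {x m : List (String × String)} {t : List (List (String × String))}
    (h : dictEq x m = false) : remF (x :: t) m = x :: remF t m := by
  unfold remF
  have e : removeFirstEq (x :: t) m = (removeFirstEq t m).map (x :: ·) := by
    simp [removeFirstEq, h]
  rw [e]
  cases removeFirstEq t m <;> rfl

lemma remF_congr {l : List (List (String × String))} {m n : List (String × String)}
    (h : dictEq m n = true) : remF l m = remF l n := by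
  induction l with
  | nil => rfl
  | cons a t ih =>
      have hpred : dictEq a m = dictEq a n := congrFun (eqPred_ext h) a
      by_cases ha : dictEq a m = true
      · rw [remF_cons_hit ha, remF_cons_hit (hpred ▸ ha)]
      · have ha' : dictEq a m = false := by simpa using ha
        rw [remF_cons_miss ha', remF_cons_miss (hpred ▸ ha'), ih]

lemma remF_comm {m n : List (String × String)} (hmn : dictEq m n = false)
    (l : List (List (String × String))) : remF (remF l m) n = remF (remF l n) m := by
  induction l with
  | nil => rfl
  | cons a t ih =>
      by_cases ham : dictEq a m = true
      · have han : dictEq a n = false := by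
          by_contra hc
          rw [Bool.not_eq_false] at hc
          rw [dictEq_trans (by rw [← dictEq_symm]; exact ham) hc] at hmn
          cases hmn
        rw [remF_cons_hit ham, remF_cons_miss han, remF_cons_hit ham]
      · have ham' : dictEq a m = false := by simpa using ham
        by_cases han : dictEq a n = true
        · rw [remF_cons_miss ham', remF_cons_hit han, remF_cons_hit han]
        · have han' : dictEq a n = false := by simpa using han
          rw [remF_cons_miss ham', remF_cons_miss han', remF_cons_miss han',
            remF_cons_miss ham', ih]

lemma occ_remF_preserve {l : List (List (String × String))} {n m : List (String × String)}
    (hne : dictEq n m = false) (h : ∃ x ∈ l, dictEq x m = true) :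
    ∃ x ∈ remF l n, dictEq x m = true := by
  induction l with
  | nil => obtain ⟨x, hx, -⟩ := h; cases hx
  | cons a t ih =>
      obtain ⟨x, hx, hxm⟩ := h
      by_cases han : dictEq a n = true
      · rw [remF_cons_hit han]
        rcases List.mem_cons.mp hx with rfl | hx'
        · exfalso
          rw [dictEq_trans (by rw [← dictEq_symm]; exact han) hxm] at hne
          cases hne
        · exact ⟨x, hx', hxm⟩
      · have han' : dictEq a n = false := by simpa using han
        rw [remF_cons_miss han']
        rcases List.mem_cons.mp hx with rfl | hx'
        · exact ⟨x, List.mem_cons_self, hxm⟩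
        · obtain ⟨y, hy, hym⟩ := ih ⟨x, hx', hxm⟩
          exact ⟨y, List.mem_cons_of_mem _ hy, hym⟩

-- ----- class representatives (first copy of each dict-equality class) -----

def reps : List (List (String × String)) → List (List (String × String))
  | [] => []
  | m :: t => m :: reps (t.filter (fun z => !dictEq z m))
termination_by l => l.length
decreasing_by
  simp only [List.length_cons, List.length_unattach]
  exact Nat.lt_succ_of_le (le_trans (List.length_filter_le _ _) (by simp [List.length_attach]))

-- remove the first copy of each class of R from cur, left to right
def dropR (cur : List (List (String × String))) (R : List (List (String × String))) :
    List (List (String × String)) :=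
  R.foldl remF cur

lemma mem_of_mem_reps {l : List (List (String × String))} {x : List (String × String)}
    (h : x ∈ reps l) : x ∈ l := by
  induction l using reps.induct with
  | case1 => rw [reps] at h; cases h
  | case2 m t ih =>
      simp only [List.unattach_filter, List.unattach_attach] at ih
      rw [reps] at h
      rcases List.mem_cons.mp h with rfl | h'
      · exact List.mem_cons_self
      · exact List.mem_cons_of_mem _ (List.mem_of_mem_filter (ih h'))

lemma class_mem_reps {l : List (List (String × String))} {z : List (String × String)}
    (hrefl : ∀ x ∈ l, dictEq x x = true) (hz : z ∈ l) :
    ∃ r ∈ reps l, dictEq r z = true := by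
  induction l using reps.induct with
  | case1 => cases hz
  | case2 m t ih =>
      simp only [List.unattach_filter, List.unattach_attach] at ih
      rw [reps]
      rcases List.mem_cons.mp hz with rfl | hz'
      · exact ⟨z, List.mem_cons_self, hrefl z (List.mem_cons_self)⟩
      · by_cases hzm : dictEq z m = true
        · exact ⟨m, List.mem_cons_self, by rw [← dictEq_symm]; exact hzm⟩
        · have hzm' : dictEq z m = false := by simpa using hzm
          have hzf : z ∈ t.filter (fun z => !dictEq z m) :=
            List.mem_filter.mpr ⟨hz', by simp [hzm']⟩
          obtain ⟨r, hr, hrz⟩ := ih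
            (fun x hx => hrefl x (List.mem_cons_of_mem _ (List.mem_of_mem_filter hx))) hzf
          exact ⟨r, List.mem_cons_of_mem _ hr, hrz⟩

lemma reps_pairwise (l : List (List (String × String))) :
    (reps l).Pairwise (fun a b => dictEq a b = false) := by
  induction l using reps.induct with
  | case1 => rw [reps]; exact List.Pairwise.nil
  | case2 m t ih =>
      simp only [List.unattach_filter, List.unattach_attach] at ih
      rw [reps, List.pairwise_cons]
      refine ⟨?_, ih⟩
      intro r hr
      have := (List.mem_filter.mp (mem_of_mem_reps hr)).2
      have hrm : dictEq r m = false := by simpa using this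
      rw [dictEq_symm]
      exact hrm

lemma reps_filter_class {t : List (List (String × String))} {m : List (String × String)} :
    reps (t.filter (fun z => !dictEq z m)) = (reps t).filter (fun z => !dictEq z m) := by
  induction t using reps.induct with
  | case1 => simp [reps]
  | case2 n t' ih =>
      simp only [List.unattach_filter, List.unattach_attach] at ih
      by_cases hnm : dictEq n m = true
      · have hpred : (fun z => !dictEq z m) = (fun z => !dictEq z n) := by
          funext z
          rw [congrFun (eqPred_ext (show dictEq m n = true by
            rw [dictEq_symm]; exact hnm)) z]
        rw [List.filter_cons_of_neg (by simp [hnm]), reps, List.filter_cons_of_neg (by simp [hnm])]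
        rw [hpred]
        have hnone : (reps (t'.filter (fun z => !dictEq z n))).filter (fun z => !dictEq z n) =
            reps (t'.filter (fun z => !dictEq z n)) := by
          rw [List.filter_eq_self]
          intro z hz
          exact (List.mem_filter.mp (mem_of_mem_reps hz)).2
        rw [hnone]
      · have hnm' : dictEq n m = false := by simpa using hnm
        rw [List.filter_cons_of_pos (by simp [hnm']), reps, reps,
          List.filter_cons_of_pos (by simp [hnm']), ← ih]
        congr 1
        rw [List.filter_filter, List.filter_filter]
        congr 1
        apply List.filter_congr
        intro z _
        rw [Bool.and_comm]

lemma dropR_nil {cur : List (List (String × String))} : dropR cur [] = cur := rfl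

lemma dropR_cons {cur : List (List (String × String))} {n : List (String × String)}
    {R : List (List (String × String))} : dropR cur (n :: R) = dropR (remF cur n) R := rfl

-- successful remove, at the Option level
lemma removeFirstEq_some_of_occ {B : List (List (String × String))} {m : List (String × String)}
    (h : ∃ x ∈ B, dictEq x m = true) : removeFirstEq B m = some (remF B m) := by
  induction B with
  | nil => obtain ⟨x, hx, -⟩ := h; cases hx
  | cons b B' ih =>
      by_cases hb : dictEq b m = true
      · rw [remF_cons_hit hb]
        simp [removeFirstEq, hb]
      · have hb' : dictEq b m = false := by simpa using hb
        have h' : ∃ x ∈ B', dictEq x m = true := by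
          obtain ⟨x, hx, hxm⟩ := h
          rcases List.mem_cons.mp hx with rfl | hx'
          · rw [hxm] at hb'; cases hb'
          · exact ⟨x, hx', hxm⟩
        rw [remF_cons_miss hb']
        simp [removeFirstEq, hb', ih h']

lemma removeFirstEq_append_some {A A' B : List (List (String × String))}
    {m : List (String × String)} (h : removeFirstEq A m = some A') :
    removeFirstEq (A ++ B) m = some (A' ++ B) := by
  induction A generalizing A' with
  | nil => simp [removeFirstEq] at h
  | cons a t ih =>
      by_cases ha : dictEq a m = true
      · simp [removeFirstEq, ha] at h ⊢
        rw [← h]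
      · have ha' : dictEq a m = false := by simpa using ha
        have hstep : removeFirstEq (a :: t) m = (removeFirstEq t m).map (a :: ·) := by
          simp [removeFirstEq, ha']
        rw [hstep] at h
        cases ht : removeFirstEq t m with
        | none => rw [ht] at h; simp at h
        | some t' =>
            rw [ht] at h
            simp only [Option.map_some, Option.some.injEq] at h
            have hgoal : removeFirstEq (a :: (t ++ B)) m
                = (removeFirstEq (t ++ B) m).map (a :: ·) := by
              simp [removeFirstEq, ha']
            rw [List.cons_append, hgoal, ih ht, ← h]
            simp

lemma removeFirstEq_append_right {A B : List (List (String × String))}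
    {m : List (String × String)} (hA : ∀ z ∈ A, dictEq z m = false)
    (hB : ∃ x ∈ B, dictEq x m = true) :
    removeFirstEq (A ++ B) m = some (A ++ remF B m) := by
  induction A with
  | nil => simpa using removeFirstEq_some_of_occ hB
  | cons a t ih =>
      have ha := hA a List.mem_cons_self
      rw [List.cons_append]
      simp only [removeFirstEq, ha, Bool.false_eq_true, if_false]
      rw [ih (fun z hz => hA z (List.mem_cons_of_mem _ hz))]
      simp

-- ----- dropR algebra -----

lemma dropR_class_present {R : List (List (String × String))} {m : List (String × String)}
    (hp : R.Pairwise (fun a b => dictEq a b = false)) (h : ∃ r ∈ R, dictEq r m = true) :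
    ∀ cur, dropR cur R = dropR (remF cur m) (R.filter (fun z => !dictEq z m)) := by
  induction R with
  | nil => obtain ⟨r, hr, -⟩ := h; cases hr
  | cons n R' ih =>
      intro cur
      rw [List.pairwise_cons] at hp
      obtain ⟨hn, hp'⟩ := hp
      by_cases hnm : dictEq n m = true
      · have hfe : R'.filter (fun z => !dictEq z m) = R' := by
          rw [List.filter_eq_self]
          intro z hz
          have : dictEq z m = false := by
            by_contra hc
            rw [Bool.not_eq_false] at hc
            have hzn : dictEq z n = true := dictEq_trans hc (by rw [← dictEq_symm]; exact hnm)
            have := hn z hz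
            rw [show dictEq n z = true by rw [← dictEq_symm]; exact hzn] at this
            cases this
          simp [this]
        rw [dropR_cons, List.filter_cons_of_neg (by simp [hnm]), hfe, remF_congr hnm]
      · have hnm' : dictEq n m = false := by simpa using hnm
        have h' : ∃ r ∈ R', dictEq r m = true := by
          obtain ⟨r, hr, hrm⟩ := h
          rcases List.mem_cons.mp hr with rfl | hr'
          · rw [hrm] at hnm'; cases hnm'
          · exact ⟨r, hr', hrm⟩
        rw [dropR_cons, List.filter_cons_of_pos (by simp [hnm']), dropR_cons,
          ih hp' h' (remF cur n), remF_comm hnm' cur]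

lemma occ_dropR {R : List (List (String × String))} {m : List (String × String)}
    (hR : ∀ r ∈ R, dictEq r m = false) :
    ∀ cur, (∃ x ∈ cur, dictEq x m = true) → ∃ x ∈ dropR cur R, dictEq x m = true := by
  induction R with
  | nil => intro cur h; exact h
  | cons n R' ih =>
      intro cur h
      rw [dropR_cons]
      exact ih (fun r hr => hR r (List.mem_cons_of_mem _ hr)) (remF cur n)
        (occ_remF_preserve (hR n List.mem_cons_self) h)

lemma remF_dropR_comm {R : List (List (String × String))} {m : List (String × String)}
    (hR : ∀ r ∈ R, dictEq r m = false) :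
    ∀ cur, remF (dropR cur R) m = dropR (remF cur m) R := by
  induction R with
  | nil => intro cur; rfl
  | cons n R' ih =>
      intro cur
      rw [dropR_cons, dropR_cons,
        ih (fun r hr => hR r (List.mem_cons_of_mem _ hr)) (remF cur n),
        remF_comm (hR n List.mem_cons_self) cur]

-- ----- A's move loop against the canonical form -----

-- A's move loop produces: class representatives of the matches, then everything else
lemma loopA :
    ∀ (ms cur : List (List (String × String))),
    (∀ m ∈ ms, ∃ x ∈ cur, dictEq x m = true) →
    (∀ m ∈ ms, dictEq m m = true) →
    List.foldr (fun m acc =>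
        match removeFirstEq acc m with
        | some acc' => m :: acc'
        | none => acc) cur ms
      = reps ms ++ dropR cur (reps ms) := by
  intro ms
  induction ms with
  | nil =>
      intro cur _ _
      rw [List.foldr_nil, reps, dropR_nil, List.nil_append]
  | cons m t ih =>
      intro cur hocc hrefl
      rw [List.foldr_cons,
        ih cur (fun m' hm' => hocc m' (List.mem_cons_of_mem _ hm'))
          (fun m' hm' => hrefl m' (List.mem_cons_of_mem _ hm'))]
      by_cases hc : ∃ r ∈ t, dictEq r m = true
      · -- the class of m also occurs among the later matches: remove hits its representative
        obtain ⟨r, hr, hrm⟩ := hc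
        obtain ⟨r', hr', hr'r⟩ := class_mem_reps
          (fun z hz => hrefl z (List.mem_cons_of_mem _ hz)) hr
        have hr'm : dictEq r' m = true := dictEq_trans hr'r hrm
        have hrem : removeFirstEq (reps t) m
            = some ((reps t).filter (fun z => !(dictEq z m))) :=
          removeFirstEq_of_countP_one
            (countP_eq_one_of_pairwise (reps_pairwise t) hr' hr'm)
        simp only [removeFirstEq_append_some hrem]
        rw [reps, reps_filter_class, dropR_cons,
          ← dropR_class_present (reps_pairwise t) ⟨r', hr', hr'm⟩ cur, List.cons_append]
      · -- the class of m occurs only once: remove hits the stranded copy in the tail part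
        have hall : ∀ r ∈ t, dictEq r m = false := by
          intro r hr
          by_contra hcon
          rw [Bool.not_eq_false] at hcon
          exact hc ⟨r, hr, hcon⟩
        have hallR : ∀ z ∈ reps t, dictEq z m = false :=
          fun z hz => hall z (mem_of_mem_reps hz)
        have hoccD : ∃ x ∈ dropR cur (reps t), dictEq x m = true :=
          occ_dropR hallR cur (hocc m List.mem_cons_self)
        simp only [removeFirstEq_append_right hallR hoccD]
        rw [remF_dropR_comm hallR cur, reps,
          List.filter_eq_self.mpr (fun z hz => by simp [hall z hz]), dropR_cons,
          List.cons_append]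


-- ----- scan formulations of the change region (proof helpers) -----
-- does the already-seen prefix contain a dict equal to x?
def seenHas (seen : List (List (String × String))) (x : List (String × String)) : Bool :=
  seen.any (fun z => dictEq z x)

-- is some matching item a later copy of an earlier matching dict?
def hasStranded (item_id field : String) (seen : List (List (String × String))) :
    List (List (String × String)) → Bool
  | [] => false
  | x :: t => if isMatch item_id field x
      then (if seenHas seen x then true else hasStranded item_id field (seen ++ [x]) t)
      else hasStranded item_id field seen t

-- is some element a first occurrence of a new matching dict?
def hasFirstB (item_id field : String) (seen : List (List (String × String)))
    (l : List (List (String × String))) : Bool :=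
  l.any (fun y => isMatch item_id field y && !seenHas seen y)

-- a later duplicate copy of a matching dict precedes a first occurrence of another matching
-- dict, or a non-matching item precedes such a later duplicate copy
def badFrom (item_id field : String) (seen : List (List (String × String))) :
    List (List (String × String)) → Bool
  | [] => false
  | x :: t => if isMatch item_id field x
      then (if seenHas seen x then hasFirstB item_id field seen t || badFrom item_id field seen t
            else badFrom item_id field (seen ++ [x]) t)
      else hasStranded item_id field seen t || badFrom item_id field seen t


-- ----- scan lemmas -----

-- the first occurrences of the distinct matching dicts, in order
def firstsFrom (item_id field : String) (seen : List (List (String × String))) :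
    List (List (String × String)) → List (List (String × String))
  | [] => []
  | x :: t => if isMatch item_id field x && !seenHas seen x
      then x :: firstsFrom item_id field (seen ++ [x]) t
      else firstsFrom item_id field seen t

-- everything else (later duplicate copies and non-matching items), in order
def restFrom (item_id field : String) (seen : List (List (String × String))) :
    List (List (String × String)) → List (List (String × String))
  | [] => []
  | x :: t => if isMatch item_id field x && !seenHas seen x
      then restFrom item_id field (seen ++ [x]) t
      else x :: restFrom item_id field seen t


lemma seenHas_append {seen : List (List (String × String))} {w x : List (String × String)} :
    seenHas (seen ++ [w]) x = (seenHas seen x || dictEq w x) := by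
  simp [seenHas]

lemma mem_firstsFrom {item_id field : String} :
    ∀ {t seen : List (List (String × String))} {y : List (String × String)},
    y ∈ firstsFrom item_id field seen t →
    isMatch item_id field y = true ∧ seenHas seen y = false := by
  intro t
  induction t with
  | nil => intro seen y h; cases h
  | cons x t ih =>
      intro seen y h
      rw [firstsFrom] at h
      split at h
      · rename_i hx
        rw [Bool.and_eq_true, Bool.not_eq_eq_eq_not, Bool.not_true] at hx
        rcases List.mem_cons.mp h with rfl | h'
        · exact ⟨hx.1, hx.2⟩
        · have := ih h'
          refine ⟨this.1, ?_⟩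
          have h2 := this.2
          rw [seenHas_append] at h2
          exact (Bool.or_eq_false_iff.mp h2).1
      · exact ih h

lemma firstsFrom_eq_nil_iff {item_id field : String} :
    ∀ {t seen : List (List (String × String))},
    firstsFrom item_id field seen t = [] ↔ hasFirstB item_id field seen t = false := by
  intro t
  induction t with
  | nil => intro seen; simp [firstsFrom, hasFirstB]
  | cons x t ih =>
      intro seen
      rw [firstsFrom, hasFirstB, List.any_cons]
      split
      · rename_i hx
        simp [hx]
      · rename_i hx
        rw [Bool.not_eq_true] at hx
        rw [hx]
        simpa [hasFirstB] using ih

lemma restFrom_eq_self {item_id field : String} :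
    ∀ {t seen : List (List (String × String))},
    hasFirstB item_id field seen t = false → restFrom item_id field seen t = t := by
  intro t
  induction t with
  | nil => intro seen _; rfl
  | cons x t ih =>
      intro seen h
      rw [hasFirstB, List.any_cons, Bool.or_eq_false_iff] at h
      rw [restFrom]
      split
      · rename_i hx; rw [hx] at h; cases h.1
      · rw [ih (by rw [hasFirstB]; exact h.2)]

lemma hasStranded_false_firsts {item_id field : String} :
    ∀ {t seen : List (List (String × String))},
    hasStranded item_id field seen t = false →
    firstsFrom item_id field seen t = t.filter (isMatch item_id field) ∧
      restFrom item_id field seen t = t.filter (fun x => !isMatch item_id field x) := by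
  intro t
  induction t with
  | nil => intro seen _; exact ⟨rfl, rfl⟩
  | cons x t ih =>
      intro seen h
      rw [hasStranded] at h
      by_cases hx : isMatch item_id field x = true
      · rw [if_pos hx] at h
        have hseen : seenHas seen x = false := by
          by_contra hc
          rw [Bool.not_eq_false] at hc
          rw [if_pos hc] at h
          cases h
        rw [if_neg (by rw [hseen]; exact Bool.false_ne_true)] at h
        obtain ⟨h1, h2⟩ := ih h
        constructor
        · rw [firstsFrom, if_pos (by rw [hx, hseen]; rfl), List.filter_cons_of_pos hx, h1]
        · rw [restFrom, if_pos (by rw [hx, hseen]; rfl),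
            List.filter_cons_of_neg (by simp [hx]), h2]
      · rw [if_neg hx] at h
        obtain ⟨h1, h2⟩ := ih h
        have hx' : isMatch item_id field x = false := by simpa using hx
        constructor
        · rw [firstsFrom, if_neg (by rw [hx']; simp), List.filter_cons_of_neg hx, h1]
        · rw [restFrom, if_neg (by rw [hx']; simp),
            List.filter_cons_of_pos (by simp [hx']), h2]

lemma hasStranded_false_bad {item_id field : String} :
    ∀ {t seen : List (List (String × String))},
    hasStranded item_id field seen t = false → badFrom item_id field seen t = false := by
  intro t
  induction t with
  | nil => intro seen _; rfl
  | cons x t ih =>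
      intro seen h
      rw [hasStranded] at h
      rw [badFrom]
      by_cases hx : isMatch item_id field x = true
      · rw [if_pos hx] at h
        have hseen : seenHas seen x = false := by
          by_contra hc
          rw [Bool.not_eq_false] at hc
          rw [if_pos hc] at h
          cases h
        rw [if_pos hx, if_neg (by rw [hseen]; exact Bool.false_ne_true)]
        rw [if_neg (by rw [hseen]; exact Bool.false_ne_true)] at h
        exact ih h
      · rw [if_neg hx] at h
        rw [if_neg hx, ih h, h]
        rfl

lemma hasStranded_of_all_seen {item_id field : String} :
    ∀ {t seen : List (List (String × String))},
    (∀ y ∈ t, isMatch item_id field y = true → seenHas seen y = true) →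
    (∃ y ∈ t, isMatch item_id field y = true) →
    hasStranded item_id field seen t = true := by
  intro t
  induction t with
  | nil => intro seen _ h; obtain ⟨y, hy, -⟩ := h; cases hy
  | cons x t ih =>
      intro seen hall hex
      rw [hasStranded]
      by_cases hx : isMatch item_id field x = true
      · rw [if_pos hx, if_pos (hall x List.mem_cons_self hx)]
      · rw [if_neg hx]
        obtain ⟨y, hy, hmy⟩ := hex
        rcases List.mem_cons.mp hy with rfl | hy'
        · exact absurd hmy hx
        · exact ih (fun y hy hmy => hall y (List.mem_cons_of_mem _ hy) hmy) ⟨y, hy', hmy⟩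

lemma hasStranded_nomatch {item_id field : String} :
    ∀ {Y : List (List (String × String))}, (∀ y ∈ Y, isMatch item_id field y = false) →
    ∀ (seen : List (List (String × String))), hasStranded item_id field seen Y = false := by
  intro Y
  induction Y with
  | nil => intro _ seen; rfl
  | cons y Y ih =>
      intro h seen
      rw [hasStranded, if_neg (by rw [h y List.mem_cons_self]; simp)]
      exact ih (fun z hz => h z (List.mem_cons_of_mem _ hz)) seen

lemma badFrom_nomatch {item_id field : String} :
    ∀ {Y : List (List (String × String))}, (∀ y ∈ Y, isMatch item_id field y = false) →
    ∀ (seen : List (List (String × String))), badFrom item_id field seen Y = false := by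
  intro Y
  induction Y with
  | nil => intro _ seen; rfl
  | cons y Y ih =>
      intro h seen
      rw [badFrom, if_neg (by rw [h y List.mem_cons_self]; simp),
        hasStranded_nomatch (fun z hz => h z (List.mem_cons_of_mem _ hz)) seen,
        ih (fun z hz => h z (List.mem_cons_of_mem _ hz)) seen]
      rfl

-- under "no later first occurrence", A = B reduces to "all matches precede all non-matches"
lemma sep_of_no_first {item_id field : String} :
    ∀ {t seen : List (List (String × String))},
    hasFirstB item_id field seen t = false →
    (badFrom item_id field seen t = false ↔
      t = t.filter (isMatch item_id field) ++ t.filter (fun x => !isMatch item_id field x)) := by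
  intro t
  induction t with
  | nil => intro seen _; simp [badFrom]
  | cons x t ih =>
      intro seen h
      rw [hasFirstB, List.any_cons, Bool.or_eq_false_iff] at h
      obtain ⟨hx_pred, ht⟩ := h
      rw [badFrom]
      by_cases hx : isMatch item_id field x = true
      · have hseen : seenHas seen x = true := by
          rw [hx] at hx_pred
          simpa using hx_pred
        rw [if_pos hx, if_pos hseen, show hasFirstB item_id field seen t = false from ht,
          Bool.false_or, List.filter_cons_of_pos hx,
          List.filter_cons_of_neg (by simp [hx]), List.cons_append]
        rw [ih ht]
        constructor
        · intro he; exact congrArg (x :: ·) he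
        · intro he; injection he
      · have hx' : isMatch item_id field x = false := by simpa using hx
        rw [if_neg hx, List.filter_cons_of_neg hx,
          List.filter_cons_of_pos (by simp [hx'])]
        cases htP : t.filter (isMatch item_id field) with
        | nil =>
            have hnom : ∀ y ∈ t, isMatch item_id field y = false := by
              intro y hy
              by_contra hc
              rw [Bool.not_eq_false] at hc
              have : y ∈ t.filter (isMatch item_id field) := List.mem_filter.mpr ⟨hy, hc⟩
              rw [htP] at this
              cases this
            rw [hasStranded_nomatch hnom seen, badFrom_nomatch hnom seen,
              List.filter_eq_self.mpr (fun z hz => by simp [hnom z hz]), List.nil_append]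
            simp
        | cons c w =>
            have hex : ∃ y ∈ t, isMatch item_id field y = true := by
              have hc : c ∈ t.filter (isMatch item_id field) := by
                rw [htP]; exact List.mem_cons_self
              exact ⟨c, List.mem_of_mem_filter hc, (List.mem_filter.mp hc).2⟩
            have hall : ∀ y ∈ t, isMatch item_id field y = true → seenHas seen y = true := by
              intro y hy hmy
              rw [List.any_eq_false] at ht
              have := ht y hy
              rw [hmy] at this
              simpa using this
            rw [hasStranded_of_all_seen hall hex, Bool.true_or]
            constructor
            · intro hfalse; cases hfalse
            · intro heq
              exfalso
              have hPc : isMatch item_id field c = true := by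
                have hc : c ∈ t.filter (isMatch item_id field) := by
                  rw [htP]; exact List.mem_cons_self
                exact (List.mem_filter.mp hc).2
              have hxc : x = c := by
                rw [List.cons_append] at heq
                injection heq
              rw [hxc, hPc] at hx'
              cases hx'

lemma length_firstsFrom_le {item_id field : String} :
    ∀ {t seen : List (List (String × String))},
    (firstsFrom item_id field seen t).length ≤ (t.filter (isMatch item_id field)).length := by
  intro t
  induction t with
  | nil => intro seen; exact Nat.le_refl _
  | cons x t ih =>
      intro seen
      rw [firstsFrom]
      split
      · rename_i hx
        rw [Bool.and_eq_true] at hx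
        rw [List.filter_cons_of_pos hx.1, List.length_cons, List.length_cons]
        exact Nat.succ_le_succ ih
      · rename_i hx
        by_cases hm : isMatch item_id field x = true
        · rw [List.filter_cons_of_pos hm, List.length_cons]
          exact Nat.le_succ_of_le ih
        · rw [List.filter_cons_of_neg hm]
          exact ih

lemma length_firstsFrom_lt {item_id field : String} :
    ∀ {t seen : List (List (String × String))},
    hasStranded item_id field seen t = true →
    (firstsFrom item_id field seen t).length < (t.filter (isMatch item_id field)).length := by
  intro t
  induction t with
  | nil => intro seen h; cases h
  | cons x t ih =>
      intro seen h
      rw [hasStranded] at h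
      rw [firstsFrom]
      by_cases hx : isMatch item_id field x = true
      · rw [if_pos hx] at h
        rw [List.filter_cons_of_pos hx, List.length_cons]
        by_cases hseen : seenHas seen x = true
        · rw [if_neg (by rw [hseen]; simp)]
          exact Nat.lt_succ_of_le length_firstsFrom_le
        · have hseen' : seenHas seen x = false := by simpa using hseen
          rw [if_neg (by rw [hseen']; simp)] at h
          rw [if_pos (by rw [hx, hseen']; rfl), List.length_cons]
          exact Nat.succ_lt_succ (ih h)
      · rw [if_neg hx] at h
        rw [if_neg (by rw [show isMatch item_id field x = false by simpa using hx]; simp),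
          List.filter_cons_of_neg hx]
        exact ih h

-- the central characterisation: the scan output matches the partition exactly when no bad
-- pattern occurs
lemma scan_eq_partition_iff {item_id field : String} :
    ∀ {t seen : List (List (String × String))},
    (firstsFrom item_id field seen t ++ restFrom item_id field seen t =
      t.filter (isMatch item_id field) ++ t.filter (fun x => !isMatch item_id field x)) ↔
    badFrom item_id field seen t = false := by
  intro t
  induction t with
  | nil => intro seen; simp [firstsFrom, restFrom, badFrom]
  | cons x t ih =>
      intro seen
      rw [firstsFrom, restFrom, badFrom]
      by_cases hx : isMatch item_id field x = true
      · by_cases hseen : seenHas seen x = true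
        · -- x is a later duplicate copy
          have hq : (isMatch item_id field x && !seenHas seen x) = false := by
            rw [hx, hseen]; rfl
          rw [if_neg (by rw [hq]; simp), if_neg (by rw [hq]; simp), if_pos hx, if_pos hseen,
            List.filter_cons_of_pos hx, List.filter_cons_of_neg (by simp [hx])]
          by_cases hhf : hasFirstB item_id field seen t = true
          · rw [hhf, Bool.true_or]
            constructor
            · intro heq
              exfalso
              cases hF : firstsFrom item_id field seen t with
              | nil => rw [firstsFrom_eq_nil_iff] at hF; rw [hF] at hhf; cases hhf
              | cons c F' =>
                  rw [hF, List.cons_append, List.cons_append] at heq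
                  have hxc : c = x := by injection heq
                  have hc : seenHas seen c = false :=
                    (mem_firstsFrom (by rw [hF]; exact List.mem_cons_self)).2
                  rw [hxc, hseen] at hc
                  cases hc
            · intro hfalse; cases hfalse
          · have hhf' : hasFirstB item_id field seen t = false := by simpa using hhf
            rw [hhf', Bool.false_or, firstsFrom_eq_nil_iff.mpr hhf', restFrom_eq_self hhf',
              List.nil_append, List.cons_append]
            rw [sep_of_no_first hhf']
            constructor
            · intro heq; injection heq
            · intro he; exact congrArg (x :: ·) he
        · -- x is a first occurrence
          have hseen' : seenHas seen x = false := by simpa using hseen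
          have hq : (isMatch item_id field x && !seenHas seen x) = true := by
            rw [hx, hseen']; rfl
          rw [if_pos hq, if_pos hq, if_pos hx, if_neg (by rw [hseen']; simp),
            List.filter_cons_of_pos hx, List.filter_cons_of_neg (by simp [hx]),
            List.cons_append, List.cons_append]
          rw [← ih (seen := seen ++ [x])]
          constructor
          · intro heq; injection heq
          · intro he; exact congrArg (x :: ·) he
      · -- x does not match
        have hx' : isMatch item_id field x = false := by simpa using hx
        rw [if_neg (by rw [hx']; simp), if_neg (by rw [hx']; simp), if_neg hx,
          List.filter_cons_of_neg hx, List.filter_cons_of_pos (by simp [hx'])]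
        by_cases hstr : hasStranded item_id field seen t = true
        · rw [hstr, Bool.true_or]
          constructor
          · intro heq
            exfalso
            have hlt : (firstsFrom item_id field seen t).length <
                (t.filter (isMatch item_id field)).length := length_firstsFrom_lt hstr
            have h1 : (firstsFrom item_id field seen t ++
                x :: restFrom item_id field seen t)[(firstsFrom item_id field seen t).length]? =
                some x := by
              rw [List.getElem?_append_right (Nat.le_refl _), Nat.sub_self]
              rfl
            have h2 : (t.filter (isMatch item_id field) ++
                x :: t.filter (fun x => !isMatch item_id field x))[(firstsFrom item_id field seen t).length]? =
                (t.filter (isMatch item_id field))[(firstsFrom item_id field seen t).length]? :=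
              List.getElem?_append_left hlt
            rw [heq, h2] at h1
            have := List.getElem?_eq_some_iff.mp h1
            obtain ⟨hk, hc⟩ := this
            have hmem : x ∈ t.filter (isMatch item_id field) := by
              rw [← hc]
              exact List.getElem_mem _
            have := (List.mem_filter.mp hmem).2
            rw [hx'] at this
            cases this
          · intro hfalse; cases hfalse
        · have hstr' : hasStranded item_id field seen t = false := by simpa using hstr
          obtain ⟨h1, h2⟩ := hasStranded_false_firsts hstr'
          rw [hstr', Bool.false_or, h1, h2, hasStranded_false_bad hstr']
          simp

-- ----- linking A's remove loop to the scans -----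

lemma reps_filter_eq_firstsFrom {item_id field : String} :
    ∀ (t seen : List (List (String × String))),
    reps (t.filter (fun x => isMatch item_id field x && !seenHas seen x)) =
      firstsFrom item_id field seen t := by
  intro t
  induction t with
  | nil => intro seen; rw [List.filter_nil, reps, firstsFrom]
  | cons x t ih =>
      intro seen
      rw [firstsFrom]
      by_cases hq : (isMatch item_id field x && !seenHas seen x) = true
      · rw [List.filter_cons, if_pos hq, reps, if_pos hq, List.filter_filter]
        have hpred : t.filter
              (fun z => !dictEq z x && (isMatch item_id field z && !seenHas seen z)) =
            t.filter (fun z => isMatch item_id field z && !seenHas (seen ++ [x]) z) := by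
          apply List.filter_congr
          intro z _
          rw [seenHas_append, dictEq_symm]
          cases isMatch item_id field z <;> cases seenHas seen z <;> cases dictEq x z <;> rfl
        rw [hpred, ih (seen ++ [x])]
      · rw [List.filter_cons, if_neg hq, if_neg hq, ih seen]

lemma dropR_cons_miss {t M : List (List (String × String))} {a : List (String × String)}
    (h : ∀ m ∈ M, dictEq a m = false) : dropR (a :: t) M = a :: dropR t M := by
  induction M generalizing t with
  | nil => rfl
  | cons m M' ih =>
      rw [dropR_cons, remF_cons_miss (h m List.mem_cons_self), dropR_cons,
        ih (fun n hn => h n (List.mem_cons_of_mem _ hn))]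

lemma dropR_firstsFrom {item_id field : String} :
    ∀ (t seen : List (List (String × String))),
    (∀ x ∈ t, dictEq x x = true) →
    dropR t (firstsFrom item_id field seen t) = restFrom item_id field seen t := by
  intro t
  induction t with
  | nil => intro seen _; rfl
  | cons x t ih =>
      intro seen hrefl
      rw [firstsFrom, restFrom]
      by_cases hq : (isMatch item_id field x && !seenHas seen x) = true
      · rw [if_pos hq, if_pos hq, dropR_cons, remF_cons_hit (hrefl x List.mem_cons_self)]
        exact ih (seen ++ [x]) (fun z hz => hrefl z (List.mem_cons_of_mem _ hz))
      · rw [if_neg hq, if_neg hq]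
        have hmiss : ∀ m ∈ firstsFrom item_id field seen t, dictEq x m = false := by
          intro m hm
          obtain ⟨hPm, hSm⟩ := mem_firstsFrom hm
          by_contra hc
          rw [Bool.not_eq_false] at hc
          rw [Bool.and_eq_true] at hq
          push Not at hq
          by_cases hPx : isMatch item_id field x = true
          · have hseen : seenHas seen x = true := by
              have := hq hPx
              simpa using this
            unfold seenHas at hseen hSm
            rw [List.any_eq_true] at hseen
            obtain ⟨z, hz, hzx⟩ := hseen
            have : dictEq z m = true := dictEq_trans hzx hc
            rw [List.any_eq_false] at hSm
            exact absurd this (by simpa using hSm z hz)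
          · have := isMatch_eq_of_dictEq hc item_id field
            rw [hPm] at this
            exact hPx this
        rw [dropR_cons_miss hmiss]
        exact congrArg (x :: ·) (ih seen (fun z hz => hrefl z (List.mem_cons_of_mem _ hz)))

-- A's result in scan form
lemma portA_scan (item_list : List (List (String × String))) (item_id field : String)
    (hpre : Pre_sort_item_list item_list item_id field) :
    sort_item_list item_list item_id field =
      firstsFrom item_id field [] (PySem.List.sorted item_list (keyOf field) false) ++
      restFrom item_id field [] (PySem.List.sorted item_list (keyOf field) false) := by
  simp only [sort_item_list]
  set s := PySem.List.sorted item_list (keyOf field) false with hs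
  have hperm := PySem.List.sorted_perm item_list (keyOf field) false
  have hrefl : ∀ z ∈ s, dictEq z z = true := fun z hz =>
    dictEq_refl (hpre z (hperm.mem_iff.mp hz))
  rw [List.foldl_reverse]
  rw [loopA (s.filter (isMatch item_id field)) s
      (fun m hm => ⟨m, List.mem_of_mem_filter hm, hrefl m (List.mem_of_mem_filter hm)⟩)
      (fun m hm => hrefl m (List.mem_of_mem_filter hm))]
  have hfe : s.filter (isMatch item_id field) =
      s.filter (fun x => isMatch item_id field x && !seenHas [] x) :=
    List.filter_congr (fun x _ => by cases isMatch item_id field x <;> rfl)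
  rw [hfe, reps_filter_eq_firstsFrom s [], dropR_firstsFrom s [] hrefl]

-- ----- stability of the PySem insertion sort, and the key partition -----

lemma insertBy_cons {α : Type} (bf : α → α → Bool) (x y : α) (ys : List α) :
    PySem.List.insertBy bf x (y :: ys) =
      if bf x y then x :: y :: ys else y :: PySem.List.insertBy bf x ys := rfl

lemma insertBy_split {α : Type} (bf : α → α → Bool) (x : α) :
    ∀ (acc : List α), ∃ pre suf, PySem.List.insertBy bf x acc = pre ++ x :: suf ∧
      acc = pre ++ suf ∧ (∀ y ∈ pre, bf x y = false) ∧
      (∀ y0, suf.head? = some y0 → bf x y0 = true) := by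
  intro acc
  induction acc with
  | nil =>
      refine ⟨[], [], rfl, rfl, ?_, ?_⟩
      · intro y hy; cases hy
      · intro y0 h; cases h
  | cons y ys ih =>
      by_cases hb : bf x y = true
      · refine ⟨[], y :: ys, by rw [insertBy_cons, if_pos hb]; rfl, rfl, ?_, ?_⟩
        · intro z hz; cases hz
        · intro y0 h
          rw [List.head?_cons, Option.some.injEq] at h
          rw [← h]; exact hb
      · obtain ⟨pre, suf, h1, h2, h3, h4⟩ := ih
        have hb' : bf x y = false := by simpa using hb
        refine ⟨y :: pre, suf, ?_, by rw [h2]; rfl, ?_, h4⟩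
        · rw [insertBy_cons, if_neg (by rw [hb']; simp), h1]
          rfl
        · intro z hz
          rcases List.mem_cons.mp hz with rfl | hz'
          · exact hb'
          · exact h3 z hz'

lemma filter_key_insertBy {α κ : Type} [LinearOrder κ] [DecidableLT κ] [DecidableEq κ] (key : α → κ) (K : κ) (x : α)
    (acc : List α) (hacc : acc.Pairwise (fun a b => key a ≤ key b)) :
    (PySem.List.insertBy (fun a b => decide (key a < key b)) x acc).filter
        (fun z => decide (key z = K)) =
      acc.filter (fun z => decide (key z = K)) ++ (if key x = K then [x] else []) := by
  obtain ⟨pre, suf, h1, h2, h3, h4⟩ := insertBy_split (fun a b => decide (key a < key b)) x acc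
  subst h2
  rw [h1, List.filter_append, List.filter_append, List.filter_cons]
  by_cases hk : key x = K
  · have hsuf : suf.filter (fun z => decide (key z = K)) = [] := by
      cases hsc : suf with
      | nil => rfl
      | cons y0 suf' =>
          have hy0 : K < key y0 := by
            have := h4 y0 (by rw [hsc]; rfl)
            rw [decide_eq_true_eq] at this
            rw [← hk]; exact this
          have hp' : (y0 :: suf').Pairwise (fun a b => key a ≤ key b) := by
            rw [hsc] at hacc
            exact (List.pairwise_append.mp hacc).2.1
          rw [List.pairwise_cons] at hp'
          rw [List.filter_eq_nil_iff]
          intro z hz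
          simp only [decide_eq_true_eq]
          rcases List.mem_cons.mp hz with rfl | hz'
          · exact ne_of_gt hy0
          · exact ne_of_gt (lt_of_lt_of_le hy0 (hp'.1 z hz'))
    rw [if_pos (by simp [hk]), if_pos hk, hsuf]
    simp
  · rw [if_neg (by simp [hk]), if_neg hk]
    simp

lemma sorted_snoc {α κ : Type} [LT κ] [DecidableLT κ] (key : α → κ) (ys : List α) (x : α) :
    PySem.List.sorted (ys ++ [x]) key false =
      PySem.List.insertBy (fun a b => decide (key a < key b)) x
        (PySem.List.sorted ys key false) := by
  rw [PySem.List.sorted_eq_foldl_insertBy, PySem.List.sorted_eq_foldl_insertBy,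
    List.foldl_append, List.foldl_cons, List.foldl_nil]

lemma insertBy_pairwise {α κ : Type} [LinearOrder κ] [DecidableLT κ] (key : α → κ)
    (x : α) (acc : List α) (hacc : acc.Pairwise (fun a b => key a ≤ key b)) :
    (PySem.List.insertBy (fun a b => decide (key a < key b)) x acc).Pairwise
      (fun a b => key a ≤ key b) := by
  obtain ⟨pre, suf, h1, h2, h3, h4⟩ := insertBy_split (fun a b => decide (key a < key b)) x acc
  subst h2
  rw [h1]
  rw [List.pairwise_append] at hacc
  obtain ⟨hpre, hsuf, hcross⟩ := hacc
  rw [List.pairwise_append]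
  refine ⟨hpre, ?_, ?_⟩
  · rw [List.pairwise_cons]
    refine ⟨?_, hsuf⟩
    intro b hb
    cases hsc : suf with
    | nil => rw [hsc] at hb; cases hb
    | cons y0 suf' =>
        have hy0 : key x < key y0 := by
          have := h4 y0 (by rw [hsc]; rfl)
          rwa [decide_eq_true_eq] at this
        rw [hsc] at hb
        rcases List.mem_cons.mp hb with rfl | hb'
        · exact le_of_lt hy0
        · rw [hsc, List.pairwise_cons] at hsuf
          exact le_of_lt (lt_of_lt_of_le hy0 (hsuf.1 b hb'))
  · intro a ha b hb
    rcases List.mem_cons.mp hb with rfl | hb'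
    · have := h3 a ha
      rw [decide_eq_false_iff_not] at this
      exact not_lt.mp this
    · exact hcross a ha b hb'

lemma sorted_pairwise' {α κ : Type} [LinearOrder κ] [DecidableLT κ] (key : α → κ) :
    ∀ (xs : List α),
    (PySem.List.sorted xs key false).Pairwise (fun a b => key a ≤ key b) := by
  have haux : ∀ (xs acc : List α), acc.Pairwise (fun a b => key a ≤ key b) →
      (xs.foldl (fun acc x =>
        PySem.List.insertBy (fun a b => decide (key a < key b)) x acc) acc).Pairwise
        (fun a b => key a ≤ key b) := by
    intro xs
    induction xs with
    | nil => intro acc h; exact h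
    | cons x xs ih =>
        intro acc h
        rw [List.foldl_cons]
        exact ih _ (insertBy_pairwise key x acc h)
  intro xs
  rw [PySem.List.sorted_eq_foldl_insertBy]
  exact haux xs [] List.Pairwise.nil

lemma sorted_filter_key_aux {α κ : Type} [LinearOrder κ] [DecidableLT κ] [DecidableEq κ] (key : α → κ) (K : κ) :
    ∀ (xs ys : List α),
    (PySem.List.sorted (ys ++ xs) key false).filter (fun z => decide (key z = K)) =
      (PySem.List.sorted ys key false).filter (fun z => decide (key z = K)) ++
        xs.filter (fun z => decide (key z = K)) := by
  intro xs
  induction xs with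
  | nil => intro ys; rw [List.append_nil, List.filter_nil, List.append_nil]
  | cons x xs ih =>
      intro ys
      have := ih (ys ++ [x])
      rw [List.append_assoc, List.singleton_append] at this
      rw [this, sorted_snoc,
        filter_key_insertBy key K x _ (sorted_pairwise' key ys),
        List.filter_cons]
      by_cases hk : key x = K
      · rw [if_pos hk, if_pos (by simp [hk])]
        simp
      · rw [if_neg hk, if_neg (by simp [hk])]
        simp

-- stability: the sorted list keeps the input order of the elements of each key class
lemma sorted_filter_key {α κ : Type} [LinearOrder κ] [DecidableLT κ] [DecidableEq κ] (key : α → κ) (K : κ) (xs : List α) :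
    (PySem.List.sorted xs key false).filter (fun z => decide (key z = K)) =
      xs.filter (fun z => decide (key z = K)) := by
  have := sorted_filter_key_aux key K xs []
  simpa using this

-- a key-sorted list splits into the strictly-smaller, equal and strictly-greater key parts
lemma pairwise_partition {α κ : Type} [LinearOrder κ] [DecidableLT κ] [DecidableEq κ] (key : α → κ) (K : κ) :
    ∀ (l : List α), l.Pairwise (fun a b => key a ≤ key b) →
    l = l.filter (fun z => decide (key z < K)) ++ l.filter (fun z => decide (key z = K)) ++
      l.filter (fun z => decide (K < key z)) := by
  intro l
  induction l with
  | nil => intro _; rfl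
  | cons x t ih =>
      intro hp
      rw [List.pairwise_cons] at hp
      obtain ⟨hx, hp'⟩ := hp
      rcases lt_trichotomy (key x) K with hlt | heq | hgt
      · rw [List.filter_cons_of_pos (by simp [hlt]),
          List.filter_cons_of_neg (by simp [ne_of_lt hlt]),
          List.filter_cons_of_neg (by simp [not_lt.mpr (le_of_lt hlt)]),
          List.cons_append, List.cons_append]
        exact congrArg (x :: ·) (ih hp')
      · have h1 : t.filter (fun z => decide (key z < K)) = [] := by
          rw [List.filter_eq_nil_iff]
          intro z hz
          simp only [decide_eq_true_eq]
          exact not_lt.mpr (heq ▸ hx z hz)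
        have h1x : (x :: t).filter (fun z => decide (key z < K)) = [] := by
          rw [List.filter_cons_of_neg (by simp [heq]), h1]
        rw [h1x, List.filter_cons_of_pos (by simp [heq]), List.nil_append, List.cons_append]
        have ht := ih hp'
        rw [h1, List.nil_append] at ht
        rw [List.filter_cons_of_neg (by simp [heq]), ← ht]
      · have hle : ∀ z ∈ t, K < key z := fun z hz => lt_of_lt_of_le hgt (hx z hz)
        have h1 : t.filter (fun z => decide (key z < K)) = [] := by
          rw [List.filter_eq_nil_iff]
          intro z hz
          simp only [decide_eq_true_eq]
          exact not_lt.mpr (le_of_lt (hle z hz))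
        have h2 : t.filter (fun z => decide (key z = K)) = [] := by
          rw [List.filter_eq_nil_iff]
          intro z hz
          simp only [decide_eq_true_eq]
          exact ne_of_gt (hle z hz)
        have h3 : t.filter (fun z => decide (K < key z)) = t :=
          List.filter_eq_self.mpr (fun z hz => by simp [hle z hz])
        rw [List.filter_cons_of_neg (by simp [not_lt.mpr (le_of_lt hgt)]),
          List.filter_cons_of_neg (by simp [ne_of_gt hgt]),
          List.filter_cons_of_pos (by simp [hgt]), h1, h2, h3, List.nil_append, List.nil_append]

-- ----- pulling badFrom through the sorted structure -----

lemma hasStranded_append_nomatch {item_id field : String}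
    {Y : List (List (String × String))} (hY : ∀ y ∈ Y, isMatch item_id field y = false) :
    ∀ (e seen : List (List (String × String))),
    hasStranded item_id field seen (e ++ Y) = hasStranded item_id field seen e := by
  intro e
  induction e with
  | nil =>
      intro seen
      rw [List.nil_append, hasStranded_nomatch hY seen]
      rfl
  | cons x e ih =>
      intro seen
      rw [List.cons_append, hasStranded, hasStranded]
      by_cases hx : isMatch item_id field x = true
      · rw [if_pos hx, if_pos hx]
        by_cases hs : seenHas seen x = true
        · rw [if_pos hs, if_pos hs]
        · rw [if_neg hs, if_neg hs, ih]
      · rw [if_neg hx, if_neg hx, ih]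

lemma hasStranded_nomatch_prefix {item_id field : String} :
    ∀ {X : List (List (String × String))}, (∀ x ∈ X, isMatch item_id field x = false) →
    ∀ (r seen : List (List (String × String))),
    hasStranded item_id field seen (X ++ r) = hasStranded item_id field seen r := by
  intro X
  induction X with
  | nil => intro _ r seen; rfl
  | cons x X ih =>
      intro hX r seen
      rw [List.cons_append, hasStranded,
        if_neg (by rw [hX x List.mem_cons_self]; simp)]
      exact ih (fun z hz => hX z (List.mem_cons_of_mem _ hz)) r seen

lemma hasFirstB_append_nomatch {item_id field : String}
    {Y : List (List (String × String))} (hY : ∀ y ∈ Y, isMatch item_id field y = false)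
    (e seen : List (List (String × String))) :
    hasFirstB item_id field seen (e ++ Y) = hasFirstB item_id field seen e := by
  unfold hasFirstB
  rw [List.any_append]
  have : Y.any (fun y => isMatch item_id field y && !seenHas seen y) = false := by
    rw [List.any_eq_false]
    intro y hy
    rw [hY y hy]
    simp
  rw [this, Bool.or_false]

lemma badFrom_append_nomatch {item_id field : String}
    {Y : List (List (String × String))} (hY : ∀ y ∈ Y, isMatch item_id field y = false) :
    ∀ (e seen : List (List (String × String))),
    badFrom item_id field seen (e ++ Y) = badFrom item_id field seen e := by
  intro e
  induction e with
  | nil =>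
      intro seen
      rw [List.nil_append, badFrom_nomatch hY seen]
      rfl
  | cons x e ih =>
      intro seen
      rw [List.cons_append, badFrom, badFrom]
      by_cases hx : isMatch item_id field x = true
      · rw [if_pos hx, if_pos hx]
        by_cases hs : seenHas seen x = true
        · rw [if_pos hs, if_pos hs, hasFirstB_append_nomatch hY, ih]
        · rw [if_neg hs, if_neg hs, ih]
      · rw [if_neg hx, if_neg hx, hasStranded_append_nomatch hY, ih]

lemma badFrom_nomatch_prefix {item_id field : String} :
    ∀ {X : List (List (String × String))}, (∀ x ∈ X, isMatch item_id field x = false) →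
    ∀ (r seen : List (List (String × String))),
    badFrom item_id field seen (X ++ r) =
      ((!X.isEmpty && hasStranded item_id field seen r) || badFrom item_id field seen r) := by
  intro X
  induction X with
  | nil => intro _ r seen; rfl
  | cons x X ih =>
      intro hX r seen
      have hX' : ∀ z ∈ X, isMatch item_id field z = false :=
        fun z hz => hX z (List.mem_cons_of_mem _ hz)
      rw [List.cons_append, badFrom, if_neg (by rw [hX x List.mem_cons_self]; simp),
        hasStranded_nomatch_prefix hX' r seen, ih hX' r seen]
      cases hasStranded item_id field seen r <;>
        cases badFrom item_id field seen r <;> simp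

-- matching items have key exactly item_id
lemma key_of_match {item_id field : String} {x : List (String × String)}
    (h : isMatch item_id field x = true) : keyOf field x = item_id.toList := by
  unfold isMatch at h
  rw [beq_iff_eq] at h
  unfold keyOf
  rw [h]
  rfl

-- ----- index formulations of the scans (to read D_ off the scan results) -----

-- "the element at position m is a later copy of an earlier seen or listed dict"
def SG (seen l : List (List (String × String))) (m : Nat) : Prop :=
  seenHas seen l[m]! = true ∨ ∃ i, i < m ∧ dictEq l[i]! l[m]! = true

lemma SG_shift_first {seen t : List (List (String × String))} {x : List (String × String)}
    {j : Nat} : SG (seen ++ [x]) t j ↔ SG seen (x :: t) (j + 1) := by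
  unfold SG
  rw [seenHas_append, Bool.or_eq_true]
  constructor
  · rintro ((h | h) | ⟨i, hij, hd⟩)
    · exact Or.inl (by simpa using h)
    · exact Or.inr ⟨0, Nat.succ_pos _, by simpa using h⟩
    · exact Or.inr ⟨i + 1, by omega, by simpa using hd⟩
  · rintro (h | ⟨i, hij, hd⟩)
    · exact Or.inl (Or.inl (by simpa using h))
    · cases i with
      | zero => exact Or.inl (Or.inr (by simpa using hd))
      | succ i' => exact Or.inr ⟨i', by omega, by simpa using hd⟩

lemma SG_shift_absorb {seen t : List (List (String × String))} {x : List (String × String)}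
    {j : Nat} (hx : seenHas seen x = true) : SG seen t j ↔ SG seen (x :: t) (j + 1) := by
  unfold SG
  constructor
  · rintro (h | ⟨i, hij, hd⟩)
    · exact Or.inl (by simpa using h)
    · exact Or.inr ⟨i + 1, by omega, by simpa using hd⟩
  · rintro (h | ⟨i, hij, hd⟩)
    · exact Or.inl (by simpa using h)
    · cases i with
      | zero =>
          refine Or.inl ?_
          unfold seenHas at hx ⊢
          rw [List.any_eq_true] at hx ⊢
          obtain ⟨z, hz, hzx⟩ := hx
          exact ⟨z, hz, dictEq_trans hzx (by simpa using hd)⟩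
      | succ i' => exact Or.inr ⟨i', by omega, by simpa using hd⟩

lemma SG_shift_nomatch {item_id field : String} {seen t : List (List (String × String))}
    {x : List (String × String)} {j : Nat} (hx : isMatch item_id field x = false)
    (hm : isMatch item_id field t[j]! = true) : SG seen t j ↔ SG seen (x :: t) (j + 1) := by
  unfold SG
  constructor
  · rintro (h | ⟨i, hij, hd⟩)
    · exact Or.inl (by simpa using h)
    · exact Or.inr ⟨i + 1, by omega, by simpa using hd⟩
  · rintro (h | ⟨i, hij, hd⟩)
    · exact Or.inl (by simpa using h)
    · cases i with
      | zero =>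
          exfalso
          have := isMatch_eq_of_dictEq (show dictEq x t[j]! = true by simpa using hd)
            item_id field
          rw [hx, hm] at this
          cases this
      | succ i' => exact Or.inr ⟨i', by omega, by simpa using hd⟩

lemma hS_idx {item_id field : String} :
    ∀ (l seen : List (List (String × String))),
    hasStranded item_id field seen l = true ↔
      ∃ j, j < l.length ∧ isMatch item_id field l[j]! = true ∧ SG seen l j := by
  intro l
  induction l with
  | nil => intro seen; simp [hasStranded]
  | cons x t ih =>
      intro seen
      rw [hasStranded]
      by_cases hm : isMatch item_id field x = true
      · rw [if_pos hm]
        by_cases hs : seenHas seen x = true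
        · rw [if_pos hs]
          constructor
          · intro _
            exact ⟨0, Nat.succ_pos _, by simpa using hm, Or.inl (by simpa using hs)⟩
          · intro _; rfl
        · rw [if_neg hs, ih (seen ++ [x])]
          constructor
          · rintro ⟨j, hj, hmj, hsg⟩
            exact ⟨j + 1, by simp [Nat.succ_lt_succ hj], by simpa using hmj,
              SG_shift_first.mp hsg⟩
          · rintro ⟨j, hj, hmj, hsg⟩
            cases j with
            | zero =>
                exfalso
                rcases hsg with h | ⟨i, hi, -⟩
                · exact hs (by simpa using h)
                · omega
            | succ j' =>
                exact ⟨j', by simp at hj; omega, by simpa using hmj, SG_shift_first.mpr hsg⟩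
      · have hm' : isMatch item_id field x = false := by simpa using hm
        rw [if_neg hm, ih seen]
        constructor
        · rintro ⟨j, hj, hmj, hsg⟩
          exact ⟨j + 1, by simp [Nat.succ_lt_succ hj], by simpa using hmj,
            (SG_shift_nomatch hm' hmj).mp hsg⟩
        · rintro ⟨j, hj, hmj, hsg⟩
          cases j with
          | zero =>
              exfalso
              rw [show (x :: t)[0]! = x by simp] at hmj
              rw [hmj] at hm'
              cases hm'
          | succ j' =>
              have hmj' : isMatch item_id field t[j']! = true := by simpa using hmj
              exact ⟨j', by simp at hj; omega, hmj', (SG_shift_nomatch hm' hmj').mpr hsg⟩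

lemma hF_idx {item_id field : String} {l seen : List (List (String × String))} :
    hasFirstB item_id field seen l = true ↔
      ∃ k, k < l.length ∧ isMatch item_id field l[k]! = true ∧ seenHas seen l[k]! = false := by
  unfold hasFirstB
  rw [List.any_eq_true]
  constructor
  · rintro ⟨y, hy, hpred⟩
    obtain ⟨k, hk, hEq⟩ := List.mem_iff_getElem.mp hy
    rw [Bool.and_eq_true, Bool.not_eq_eq_eq_not, Bool.not_true] at hpred
    exact ⟨k, hk, by rw [getElem!_pos l k hk, hEq]; exact hpred.1,
      by rw [getElem!_pos l k hk, hEq]; exact hpred.2⟩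
  · rintro ⟨k, hk, h1, h2⟩
    refine ⟨l[k], List.getElem_mem hk, ?_⟩
    rw [getElem!_pos l k hk] at h1 h2
    rw [h1, h2]
    rfl

-- badFrom, read off positions: a later copy (j) followed by a new dict's first occurrence (k),
-- or a non-matching item (j) followed by a later copy (k)
def BF (item_id field : String) (seen l : List (List (String × String))) : Prop :=
  ∃ j, j < l.length ∧
    ((isMatch item_id field l[j]! = true ∧ SG seen l j ∧
      ∃ k, k < l.length ∧ j < k ∧ isMatch item_id field l[k]! = true ∧
        seenHas seen l[k]! = false ∧ ∀ i, i < j → dictEq l[i]! l[k]! = false) ∨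
     (isMatch item_id field l[j]! = false ∧
      ∃ k, k < l.length ∧ j < k ∧ isMatch item_id field l[k]! = true ∧ SG seen l k))

lemma bF_idx {item_id field : String} :
    ∀ (l seen : List (List (String × String))),
    badFrom item_id field seen l = true ↔ BF item_id field seen l := by
  intro l
  induction l with
  | nil => intro seen; simp [badFrom, BF]
  | cons x t ih =>
      intro seen
      rw [badFrom]
      by_cases hm : isMatch item_id field x = true
      · by_cases hs : seenHas seen x = true
        · -- x is a later copy: bad iff a later first occurrence exists, or bad in the tail
          rw [if_pos hm, if_pos hs, Bool.or_eq_true, hF_idx, ih seen]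
          constructor
          · rintro (⟨k, hk, hmk, hsk⟩ | ⟨j, hj, hcase⟩)
            · -- x itself with the later first k
              refine ⟨0, Nat.succ_pos _, Or.inl ⟨by simpa using hm, Or.inl (by simpa using hs),
                k + 1, by simp [Nat.succ_lt_succ hk], Nat.succ_pos _, by simpa using hmk,
                by simpa using hsk, ?_⟩⟩
              intro i hi
              omega
            · -- shift a bad pattern of the tail
              rcases hcase with ⟨hmj, hsgj, k, hk, hjk, hmk, hsk, hall⟩ | ⟨hmj, k, hk, hjk, hmk, hsgk⟩
              · refine ⟨j + 1, by simp [Nat.succ_lt_succ hj], Or.inl ⟨by simpa using hmj,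
                  (SG_shift_absorb hs).mp hsgj, k + 1, by simp [Nat.succ_lt_succ hk],
                  by omega, by simpa using hmk, by simpa using hsk, ?_⟩⟩
                intro i hi
                cases i with
                | zero =>
                    simp only [List.getElem!_cons_zero, List.getElem!_cons_succ]
                    by_contra hc
                    rw [Bool.not_eq_false] at hc
                    unfold seenHas at hs
                    rw [List.any_eq_true] at hs
                    obtain ⟨z, hz, hzx⟩ := hs
                    have : seenHas seen t[k]! = true := by
                      unfold seenHas
                      rw [List.any_eq_true]
                      exact ⟨z, hz, dictEq_trans hzx hc⟩
                    rw [this] at hsk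
                    cases hsk
                | succ i' => simpa using hall i' (by omega)
              · refine ⟨j + 1, by simp [Nat.succ_lt_succ hj], Or.inr ⟨by simpa using hmj,
                  k + 1, by simp [Nat.succ_lt_succ hk], by omega, by simpa using hmk,
                  (SG_shift_absorb hs).mp hsgk⟩⟩
          · rintro ⟨j, hj, hcase⟩
            cases j with
            | zero =>
                rcases hcase with ⟨-, -, k, hk, hk0, hmk, hsk, -⟩ | ⟨hmj, -⟩
                · cases k with
                  | zero => omega
                  | succ k' =>
                      exact Or.inl ⟨k', by simp at hk; omega, by simpa using hmk,
                        by simpa using hsk⟩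
                · rw [show (x :: t)[0]! = x by simp, hm] at hmj
                  cases hmj
            | succ j' =>
                refine Or.inr ⟨j', by simp at hj; omega, ?_⟩
                rcases hcase with ⟨hmj, hsgj, k, hk, hjk, hmk, hsk, hall⟩ | ⟨hmj, k, hk, hjk, hmk, hsgk⟩
                · cases k with
                  | zero => omega
                  | succ k' =>
                      exact Or.inl ⟨by simpa using hmj, (SG_shift_absorb hs).mpr hsgj,
                        k', by simp at hk; omega, by omega, by simpa using hmk,
                        by simpa using hsk, fun i hi => by simpa using hall (i + 1) (by omega)⟩
                · cases k with
                  | zero => omega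
                  | succ k' =>
                      exact Or.inr ⟨by simpa using hmj, k', by simp at hk; omega, by omega,
                        by simpa using hmk, (SG_shift_absorb hs).mpr hsgk⟩
        · -- x is a first occurrence
          have hs' : seenHas seen x = false := by simpa using hs
          rw [if_pos hm, if_neg hs, ih (seen ++ [x])]
          constructor
          · rintro ⟨j, hj, hcase⟩
            rcases hcase with ⟨hmj, hsgj, k, hk, hjk, hmk, hsk, hall⟩ | ⟨hmj, k, hk, hjk, hmk, hsgk⟩
            · rw [seenHas_append, Bool.or_eq_false_iff] at hsk
              refine ⟨j + 1, by simp [Nat.succ_lt_succ hj], Or.inl ⟨by simpa using hmj,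
                SG_shift_first.mp hsgj, k + 1, by simp [Nat.succ_lt_succ hk], by omega,
                by simpa using hmk, by simpa using hsk.1, ?_⟩⟩
              intro i hi
              cases i with
              | zero => simpa using hsk.2
              | succ i' => simpa using hall i' (by omega)
            · refine ⟨j + 1, by simp [Nat.succ_lt_succ hj], Or.inr ⟨by simpa using hmj,
                k + 1, by simp [Nat.succ_lt_succ hk], by omega, by simpa using hmk,
                SG_shift_first.mp hsgk⟩⟩
          · rintro ⟨j, hj, hcase⟩
            cases j with
            | zero =>
                exfalso
                rcases hcase with ⟨-, hsgj, -⟩ | ⟨hmj, -⟩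
                · rcases hsgj with h | ⟨i, hi, -⟩
                  · rw [show (x :: t)[0]! = x by simp] at h
                    rw [h] at hs'
                    cases hs'
                  · omega
                · rw [show (x :: t)[0]! = x by simp, hm] at hmj
                  cases hmj
            | succ j' =>
                refine ⟨j', by simp at hj; omega, ?_⟩
                rcases hcase with ⟨hmj, hsgj, k, hk, hjk, hmk, hsk, hall⟩ | ⟨hmj, k, hk, hjk, hmk, hsgk⟩
                · cases k with
                  | zero => omega
                  | succ k' =>
                      refine Or.inl ⟨by simpa using hmj, SG_shift_first.mpr hsgj, k',
                        by simp at hk; omega, by omega, by simpa using hmk, ?_, ?_⟩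
                      · rw [seenHas_append, Bool.or_eq_false_iff]
                        refine ⟨by simpa using hsk, ?_⟩
                        simpa using hall 0 (by omega)
                      · intro i hi
                        simpa using hall (i + 1) (by omega)
                · cases k with
                  | zero => omega
                  | succ k' =>
                      exact Or.inr ⟨by simpa using hmj, k', by simp at hk; omega, by omega,
                        by simpa using hmk, SG_shift_first.mpr hsgk⟩
      · -- x does not match: bad iff a later copy exists, or bad in the tail
        have hm' : isMatch item_id field x = false := by simpa using hm
        rw [if_neg hm, Bool.or_eq_true, hS_idx t seen, ih seen]
        constructor
        · rintro (⟨k, hk, hmk, hsgk⟩ | ⟨j, hj, hcase⟩)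
          · exact ⟨0, Nat.succ_pos _, Or.inr ⟨by simpa using hm', k + 1,
              by simp [Nat.succ_lt_succ hk], Nat.succ_pos _, by simpa using hmk,
              (SG_shift_nomatch hm' hmk).mp hsgk⟩⟩
          · rcases hcase with ⟨hmj, hsgj, k, hk, hjk, hmk, hsk, hall⟩ | ⟨hmj, k, hk, hjk, hmk, hsgk⟩
            · refine ⟨j + 1, by simp [Nat.succ_lt_succ hj], Or.inl ⟨by simpa using hmj,
                (SG_shift_nomatch hm' hmj).mp hsgj, k + 1, by simp [Nat.succ_lt_succ hk],
                by omega, by simpa using hmk, by simpa using hsk, ?_⟩⟩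
              intro i hi
              cases i with
              | zero =>
                  simp only [List.getElem!_cons_zero, List.getElem!_cons_succ]
                  by_contra hc
                  rw [Bool.not_eq_false] at hc
                  have := isMatch_eq_of_dictEq hc item_id field
                  rw [hm', hmk] at this
                  cases this
              | succ i' => simpa using hall i' (by omega)
            · exact ⟨j + 1, by simp [Nat.succ_lt_succ hj], Or.inr ⟨by simpa using hmj,
                k + 1, by simp [Nat.succ_lt_succ hk], by omega, by simpa using hmk,
                (SG_shift_nomatch hm' hmk).mp hsgk⟩⟩
        · rintro ⟨j, hj, hcase⟩
          cases j with
          | zero =>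
              rcases hcase with ⟨hmj, -⟩ | ⟨-, k, hk, hjk, hmk, hsgk⟩
              · rw [show (x :: t)[0]! = x by simp, hm'] at hmj
                cases hmj
              · cases k with
                | zero => omega
                | succ k' =>
                    have hmk' : isMatch item_id field t[k']! = true := by simpa using hmk
                    exact Or.inl ⟨k', by simp at hk; omega, hmk',
                      (SG_shift_nomatch hm' hmk').mpr hsgk⟩
          | succ j' =>
              refine Or.inr ⟨j', by simp at hj; omega, ?_⟩
              rcases hcase with ⟨hmj, hsgj, k, hk, hjk, hmk, hsk, hall⟩ | ⟨hmj, k, hk, hjk, hmk, hsgk⟩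
              · have hmj' : isMatch item_id field t[j']! = true := by simpa using hmj
                cases k with
                | zero => omega
                | succ k' =>
                    exact Or.inl ⟨hmj', (SG_shift_nomatch hm' hmj').mpr hsgj, k',
                      by simp at hk; omega, by omega, by simpa using hmk,
                      by simpa using hsk, fun i hi => by simpa using hall (i + 1) (by omega)⟩
              · cases k with
                | zero => omega
                | succ k' =>
                    have hmk' : isMatch item_id field t[k']! = true := by simpa using hmk
                    exact Or.inr ⟨by simpa using hmj, k', by simp at hk; omega, by omega,
                      hmk', (SG_shift_nomatch hm' hmk').mpr hsgk⟩

-- the transfer: the bad pattern on the sorted list, read off the input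
lemma bad_sorted_iff_D (item_list : List (List (String × String))) (item_id field : String) :
    badFrom item_id field [] (PySem.List.sorted item_list (keyOf field) false) = true ↔
      D_sort_item_list item_list item_id field := by
  unfold D_sort_item_list
  have hfe : item_list.filter (fun z => (pyGet z field).getD "" == item_id) =
      item_list.filter (fun z => decide (keyOf field z = item_id.toList)) := by
    apply List.filter_congr
    intro z _
    by_cases h : (pyGet z field).getD "" = item_id
    · simp [keyOf, h]
    · simp [keyOf, h, String.toList_inj]
  rw [hfe]
  have hperm := PySem.List.sorted_perm item_list (keyOf field) false
  have hpw : (PySem.List.sorted item_list (keyOf field) false).Pairwise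
      (fun a b => keyOf field a ≤ keyOf field b) :=
    sorted_pairwise' (keyOf field) item_list
  have hpart := pairwise_partition (keyOf field) item_id.toList
    (PySem.List.sorted item_list (keyOf field) false) hpw
  have hXnm : ∀ x ∈ (PySem.List.sorted item_list (keyOf field) false).filter
      (fun z => decide (keyOf field z < item_id.toList)), isMatch item_id field x = false := by
    intro x hx
    have hlt := (List.mem_filter.mp hx).2
    rw [decide_eq_true_eq] at hlt
    by_contra hc
    rw [Bool.not_eq_false] at hc
    rw [key_of_match hc] at hlt
    exact absurd hlt (lt_irrefl _)
  have hYnm : ∀ y ∈ (PySem.List.sorted item_list (keyOf field) false).filter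
      (fun z => decide (item_id.toList < keyOf field z)), isMatch item_id field y = false := by
    intro y hy
    have hgt := (List.mem_filter.mp hy).2
    rw [decide_eq_true_eq] at hgt
    by_contra hc
    rw [Bool.not_eq_false] at hc
    rw [key_of_match hc] at hgt
    exact absurd hgt (lt_irrefl _)
  have hEil : (PySem.List.sorted item_list (keyOf field) false).filter
        (fun z => decide (keyOf field z = item_id.toList)) =
      item_list.filter (fun z => decide (keyOf field z = item_id.toList)) :=
    sorted_filter_key (keyOf field) item_id.toList item_list
  have hbadexp : badFrom item_id field [] (PySem.List.sorted item_list (keyOf field) false) =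
      ((!((PySem.List.sorted item_list (keyOf field) false).filter
            (fun z => decide (keyOf field z < item_id.toList))).isEmpty &&
          hasStranded item_id field []
            (item_list.filter (fun z => decide (keyOf field z = item_id.toList)))) ||
        badFrom item_id field []
          (item_list.filter (fun z => decide (keyOf field z = item_id.toList)))) := by
    conv_lhs => rw [hpart, List.append_assoc]
    rw [badFrom_nomatch_prefix hXnm _ [], hasStranded_append_nomatch hYnm _ [],
      badFrom_append_nomatch hYnm _ [], hEil]
  have hXne : (!((PySem.List.sorted item_list (keyOf field) false).filter
        (fun z => decide (keyOf field z < item_id.toList))).isEmpty) = true ↔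
      ∃ z ∈ item_list, keyOf field z < item_id.toList := by
    constructor
    · intro h
      cases hXc : (PySem.List.sorted item_list (keyOf field) false).filter
          (fun z => decide (keyOf field z < item_id.toList)) with
      | nil => rw [hXc] at h; cases h
      | cons x X' =>
          have hx : x ∈ (PySem.List.sorted item_list (keyOf field) false).filter
              (fun z => decide (keyOf field z < item_id.toList)) := by
            rw [hXc]; exact List.mem_cons_self
          have hm := List.mem_filter.mp hx
          refine ⟨x, hperm.mem_iff.mp hm.1, ?_⟩
          have := hm.2
          rwa [decide_eq_true_eq] at this
    · intro hz
      obtain ⟨z, hz, hlt⟩ := hz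
      have hzX : z ∈ (PySem.List.sorted item_list (keyOf field) false).filter
          (fun z => decide (keyOf field z < item_id.toList)) :=
        List.mem_filter.mpr ⟨hperm.mem_iff.mpr hz, by simp [hlt]⟩
      cases hXc : (PySem.List.sorted item_list (keyOf field) false).filter
          (fun z => decide (keyOf field z < item_id.toList)) with
      | nil => rw [hXc] at hzX; cases hzX
      | cons a b => rfl
  rw [hbadexp, Bool.or_eq_true, Bool.and_eq_true, hXne,
    hS_idx (item_list.filter (fun z => decide (keyOf field z = item_id.toList))) [],
    bF_idx (item_list.filter (fun z => decide (keyOf field z = item_id.toList))) []]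
  unfold BF SG
  show _ ↔ ∃ j, j < (item_list.filter (fun z => decide (keyOf field z = item_id.toList))).length ∧ _
  constructor
  · rintro (⟨hQ, j, hj, hmj, hsg⟩ | ⟨j, hj, hcase⟩)
    · rcases hsg with h | ⟨i, hi, hd⟩
      · simp [seenHas] at h
      · exact ⟨j, hj, hmj, ⟨i, hi, hd⟩, Or.inl hQ⟩
    · rcases hcase with ⟨hmj, hsgj, k, hk, hjk, hmk, hsk, hall⟩ | ⟨hmj, k, hk, hjk, hmk, hsgk⟩
      · rcases hsgj with h | ⟨i, hi, hd⟩
        · simp [seenHas] at h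
        · exact ⟨j, hj, hmj, ⟨i, hi, hd⟩,
            Or.inr ⟨k, hk, Or.inr ⟨hjk, hmk,
              fun i2 hi2 => by rw [Bool.not_eq_true]; exact hall i2 hi2⟩⟩⟩
      · rcases hsgk with h | ⟨i, hi, hd⟩
        · simp [seenHas] at h
        · exact ⟨k, hk, hmk, ⟨i, hi, hd⟩, Or.inr ⟨j, by omega,
            Or.inl ⟨hjk, by rw [Bool.not_eq_true]; exact hmj⟩⟩⟩
  · rintro ⟨j, hj, hmj, ⟨i, hi, hd⟩, hdisj⟩
    rcases hdisj with hQ | ⟨k, hk, ⟨hkj, hm2⟩ | ⟨hjk, hmk, hall⟩⟩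
    · exact Or.inl ⟨hQ, j, hj, hmj, Or.inr ⟨i, hi, hd⟩⟩
    · exact Or.inr ⟨k, hk, Or.inr ⟨by have := hm2; rwa [Bool.not_eq_true] at this, j, hj, hkj, hmj,
        Or.inr ⟨i, hi, hd⟩⟩⟩
    · exact Or.inr ⟨j, hj, Or.inl ⟨hmj, Or.inr ⟨i, hi, hd⟩, k, hk, hjk, hmk,
        by simp [seenHas], fun i2 hi2 => by have := hall i2 hi2; rwa [Bool.not_eq_true] at this⟩⟩

-- ===== VERDICT (by name: the statement is the Claim_ definition above) =====
theorem sort_item_list_spec : Claim_unchanged_sort_item_list := by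
  intro item_list item_id field _hdom hpre
  unfold Spec_sort_item_list
  intro hnD
  have hbad : badFrom item_id field []
      (PySem.List.sorted item_list (keyOf field) false) = false := by
    by_contra hc
    rw [Bool.not_eq_false] at hc
    exact hnD ((bad_sorted_iff_D item_list item_id field).mp hc)
  rw [portA_scan item_list item_id field hpre]
  show firstsFrom item_id field [] (PySem.List.sorted item_list (keyOf field) false) ++
      restFrom item_id field [] (PySem.List.sorted item_list (keyOf field) false) =
    (PySem.List.sorted item_list (keyOf field) false).filter (isMatch item_id field) ++
      (PySem.List.sorted item_list (keyOf field) false).filter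
        (fun x => !isMatch item_id field x)
  exact scan_eq_partition_iff.mpr hbad

theorem sort_item_list_changed : Claim_changed_sort_item_list := by
  unfold Claim_changed_sort_item_list; decide

theorem sort_item_list_tight : Claim_exact_sort_item_list := by
  intro item_list item_id field _hdom hpre hD heq
  have hbad : badFrom item_id field []
      (PySem.List.sorted item_list (keyOf field) false) = true :=
    (bad_sorted_iff_D item_list item_id field).mpr hD
  rw [portA_scan item_list item_id field hpre] at heq
  have heq' : firstsFrom item_id field [] (PySem.List.sorted item_list (keyOf field) false) ++
      restFrom item_id field [] (PySem.List.sorted item_list (keyOf field) false) =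
      (PySem.List.sorted item_list (keyOf field) false).filter (isMatch item_id field) ++
      (PySem.List.sorted item_list (keyOf field) false).filter
        (fun x => !isMatch item_id field x) := heq
  rw [scan_eq_partition_iff.mp heq'] at hbad
  cases hbad
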